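-- pv_equiv track=rewrite | github.com/shrivastava-himanshu/Leetcode_practice | sum_13.py | sum13
-- ===== SOURCE A (Python) =====
-- def sum13(nums):
--     s = sum(nums)
--     i = 0
--     while i<=len(nums)-1:
--
--         if nums[i] == 13 and i == len(nums) - 1:
--             s = s - nums[i]   #- nums[i+1]
--             i += 1
--         elif nums[i] == 13 and i != len(nums) - 1:
--             s = s - nums[i] - nums[i + 1]
--             i += 2
--         else:
--             i +=1
--
--     return (s)
-- ===== SOURCE B (Python) =====
-- def sum13(nums):
--     total = 0
--     skip = False
--     for x in nums:
--         if skip: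
--             skip = False
--         elif x == 13:
--             skip = True
--         else:
--             total += x
--     return total
-- ===== Notes on version B (the rewrite author's own statement) =====
-- stated objective: simpler
-- what changed: Single for-each pass carrying a (total, skip) state: add each kept element, set a skip flag on 13 to drop the follower; no precomputed sum(nums), no subtraction, no index arithmetic.
import Mathlib
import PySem

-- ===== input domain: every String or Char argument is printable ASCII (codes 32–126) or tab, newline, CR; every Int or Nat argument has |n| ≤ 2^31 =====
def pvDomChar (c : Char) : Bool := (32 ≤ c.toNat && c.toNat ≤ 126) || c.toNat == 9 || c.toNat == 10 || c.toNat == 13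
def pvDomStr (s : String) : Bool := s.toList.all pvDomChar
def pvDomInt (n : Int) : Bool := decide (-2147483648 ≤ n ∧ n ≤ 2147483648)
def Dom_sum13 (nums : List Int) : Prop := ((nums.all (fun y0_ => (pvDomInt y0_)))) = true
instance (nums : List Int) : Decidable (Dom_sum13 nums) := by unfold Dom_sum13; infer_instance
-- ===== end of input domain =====

-- B is simpler by decomposition: one for-each pass with a (total, skip) state instead of sum(nums) minus corrections.

-- ===== PORT A =====
-- A's while loop over index i, here as recursion on the suffix nums[i:]: subtract a 13
-- (and its follower when one exists) from the precomputed total s.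
def sum13Loop : List Int → Int → Int
  | [], s => s
  | x :: rest, s =>
    if x == 13 then
      match rest with
      | [] => s - x                                 -- i == len-1 branch: s -= nums[i], loop ends
      | y :: rest' => sum13Loop rest' (s - x - y)   -- s -= nums[i] + nums[i+1]; i += 2
    else sum13Loop rest s

def sum13 (nums : List Int) : Int := sum13Loop nums nums.sum

-- ===== PORT B =====
-- B's for-each loop: fold carrying (total, skip); a consumed skip drops the element,
-- a 13 sets the flag, anything else is added.
def sum13Step (st : Int × Bool) (x : Int) : Int × Bool :=
  if st.2 then (st.1, false)
  else if x == 13 then (st.1, true)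
  else (st.1 + x, st.2)

def sum13_alt (nums : List Int) : Int := (nums.foldl sum13Step (0, false)).1

-- ===== PRECONDITION & SPEC =====
def Spec_sum13 (nums : List Int) (out : Int) : Prop := out = sum13_alt nums
instance (nums : List Int) (out : Int) : Decidable (Spec_sum13 nums out) := by unfold Spec_sum13; infer_instance

-- ===== CLAIM =====
def Claim_equal_sum13 : Prop := ∀ (nums : List Int), Dom_sum13 nums → Spec_sum13 nums (sum13 nums)

-- ===== LEMMAS AND PROOFS =====
theorem foldl_step_acc : ∀ (l : List Int) (t : Int) (b : Bool),
    (l.foldl sum13Step (t, b)).1 = t + (l.foldl sum13Step (0, b)).1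
  | [], t, b => by simp
  | x :: l, t, b => by
      cases b with
      | true => simp only [List.foldl_cons, sum13Step]; exact foldl_step_acc l t false
      | false =>
        by_cases h : x = 13
        · simp only [List.foldl_cons, sum13Step, h, beq_self_eq_true, if_true]
          exact foldl_step_acc l t true
        · simp only [List.foldl_cons, sum13Step,
            show (x == 13) = false by simpa using h, Bool.false_eq_true, if_false]
          rw [foldl_step_acc l (t + x) false, foldl_step_acc l (0 + x) false]
          ring

theorem sum13Loop_eq : ∀ (l : List Int) (s : Int),
    sum13Loop l s = s - l.sum + (l.foldl sum13Step (0, false)).1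
  | [], s => by simp [sum13Loop]
  | [x], s => by
      by_cases h : x = 13 <;>
        simp [sum13Loop, sum13Step, h] <;> ring
  | x :: y :: rest, s => by
      by_cases h : x = 13
      · subst h
        simp only [sum13Loop, beq_self_eq_true, if_true, List.foldl_cons, sum13Step]
        rw [sum13Loop_eq rest (s - 13 - y)]
        simp; ring
      · simp only [sum13Loop,
          show (x == 13) = false by simpa using h, Bool.false_eq_true, if_false]
        rw [sum13Loop_eq (y :: rest) s,
          show ((x :: y :: rest).foldl sum13Step (0, false)).1
              = (0 + x) + ((y :: rest).foldl sum13Step (0, false)).1 by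
            rw [List.foldl_cons,
              show sum13Step (0, false) x = (0 + x, false) by
                simp [sum13Step, show (x == 13) = false by simpa using h]]
            exact foldl_step_acc (y :: rest) (0 + x) false]
        simp only [List.sum_cons]
        ring

-- ===== VERDICT =====
theorem sum13_spec : Claim_equal_sum13 := by
  intro nums _
  unfold Spec_sum13 sum13 sum13_alt
  rw [sum13Loop_eq]; ring
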